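-- pv_equiv track=rewrite | github.com/chennyso/agent | examples/hybrid_parallel/hybrid_policy.py | _default_stage_modules
-- ===== SOURCE A (Python) =====
-- from typing import Any, Dict, List, Optional, Sequence, Tuple
--
-- def _default_stage_modules(stage_ranges: Sequence[Sequence[int]]) -> List[List[str]]:
--     modules: List[List[str]] = []
--     for idx, (start, end) in enumerate(stage_ranges):
--         stage_modules: List[str] = []
--         if idx == 0:
--             stage_modules.append("tok_embeddings")
--         stage_modules.extend([f"layers.{layer_idx}" for layer_idx in range(int(start), int(end) + 1)])
--         if idx == len(stage_ranges) - 1: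
--             stage_modules.extend(["norm", "output"])
--         modules.append(stage_modules)
--     return modules
-- ===== SOURCE B (Python) =====
-- from typing import List, Sequence
--
-- def _default_stage_modules(stage_ranges: Sequence[Sequence[int]]) -> List[List[str]]:
--     if not stage_ranges:
--         return []
--     # One flat stream of all module names, plus the number of layer names per stage.
--     counts = [len(range(int(s), int(e) + 1)) for s, e in stage_ranges]
--     flat = (["tok_embeddings"]
--             + [f"layers.{i}" for s, e in stage_ranges for i in range(int(s), int(e) + 1)]
--             + ["norm", "output"])
--     # Account the sentinel names to the first / last stage, then re-partition by slicing.
--     counts[0] += 1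
--     counts[-1] += 2
--     out: List[List[str]] = []
--     pos = 0
--     for c in counts:
--         out.append(flat[pos:pos + c])
--         pos += c
--     return out
-- ===== Notes on version B (the rewrite author's own statement) =====
-- stated objective: alternative
-- what changed: B never builds per-stage lists directly: it emits one flat stream of all module names (tok_embeddings, all layers, norm, output) plus per-stage layer counts, charges the sentinel names to the first/last count, and re-partitions the flat stream into stages by slicing at the accumulated offsets.
import Mathlib
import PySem

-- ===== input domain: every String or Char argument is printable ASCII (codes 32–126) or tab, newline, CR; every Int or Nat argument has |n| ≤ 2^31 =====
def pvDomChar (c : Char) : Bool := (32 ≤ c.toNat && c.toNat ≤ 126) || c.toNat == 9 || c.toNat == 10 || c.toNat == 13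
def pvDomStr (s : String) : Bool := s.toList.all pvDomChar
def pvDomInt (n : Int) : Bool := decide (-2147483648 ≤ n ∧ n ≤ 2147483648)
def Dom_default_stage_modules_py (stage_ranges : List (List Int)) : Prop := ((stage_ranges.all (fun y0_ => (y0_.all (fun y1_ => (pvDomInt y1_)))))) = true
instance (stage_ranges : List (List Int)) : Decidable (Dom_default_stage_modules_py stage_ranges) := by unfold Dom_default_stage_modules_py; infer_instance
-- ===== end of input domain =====

-- B builds one flat stream of all module names plus per-stage layer counts and re-partitions
-- it by slicing at accumulated offsets, instead of A's per-stage lists with in-loop idx checks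
-- (objective: alternative, same cost).


-- ===== PORT A =====
-- the comprehension [f"layers.{i}" for i in range(int(start), int(end)+1)]
def pvLayers (r : List Int) : List String :=
  (PySem.List.pyRange (PySem.List.pyGetD r 0 0) (PySem.List.pyGetD r 1 0 + 1) 1).map (fun i => "layers." ++ PySem.Int.toStr i)

-- A's loop over enumerate(stage_ranges), building each stage list with the in-loop idx checks
def pvAGo (n : Nat) (idx : Nat) : List (List Int) → List (List String)
  | [] => []
  | r :: rest =>
      let stage := (if idx = 0 then ["tok_embeddings"] else [])
                    ++ pvLayers r
                    ++ (if idx = n - 1 then ["norm", "output"] else [])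
      stage :: pvAGo n (idx + 1) rest

def default_stage_modules_py (stage_ranges : List (List Int)) : List (List String) :=
  pvAGo stage_ranges.length 0 stage_ranges

-- ===== PORT B =====
-- counts[-1] += 2
def pvPatchLast2 : List Int → List Int
  | [] => []
  | [c] => [c + 2]
  | c :: rest => c :: pvPatchLast2 rest

-- the partition loop: out.append(flat[pos:pos+c]); pos += c
def pvSplit (flat : List String) (pos : Int) : List Int → List (List String)
  | [] => []
  | c :: rest => PySem.List.slice flat (some pos) (some (pos + c)) :: pvSplit flat (pos + c) rest

def default_stage_modules_py_alt (stage_ranges : List (List Int)) : List (List String) :=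
  if stage_ranges = [] then []
  else
    let counts : List Int := stage_ranges.map (fun r =>
      ((PySem.List.pyRange (PySem.List.pyGetD r 0 0) (PySem.List.pyGetD r 1 0 + 1) 1).length : Int))
    let flat : List String := "tok_embeddings" :: stage_ranges.flatMap pvLayers ++ ["norm", "output"]
    let counts' := match counts with
      | [] => []
      | c :: rest => pvPatchLast2 ((c + 1) :: rest)   -- counts[0] += 1; counts[-1] += 2
    pvSplit flat 0 counts'

-- ===== PRECONDITION & SPEC =====
-- Pre_ excludes sublists whose length is not 2: Python's tuple unpacking raises ValueError there.
def Pre_default_stage_modules_py (stage_ranges : List (List Int)) : Prop :=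
  ∀ r ∈ stage_ranges, r.length = 2
instance (stage_ranges : List (List Int)) : Decidable (Pre_default_stage_modules_py stage_ranges) := by unfold Pre_default_stage_modules_py; infer_instance
def pvWitness_default_stage_modules_py : List (List Int) := [[0, 1], [2, 5]]

def Spec_default_stage_modules_py (stage_ranges : List (List Int)) (out : List (List String)) : Prop := out = default_stage_modules_py_alt stage_ranges
instance (stage_ranges : List (List Int)) (out : List (List String)) : Decidable (Spec_default_stage_modules_py stage_ranges out) := by unfold Spec_default_stage_modules_py; infer_instance

-- ===== CLAIM (what is proved, stated in full; the proofs are below) =====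
def Claim_equal_default_stage_modules_py : Prop := ∀ (stage_ranges : List (List Int)), Dom_default_stage_modules_py stage_ranges → Pre_default_stage_modules_py stage_ranges → Spec_default_stage_modules_py stage_ranges (default_stage_modules_py stage_ranges)

-- ===== LEMMAS AND PROOFS =====
-- proof-only middle form: per-stage lists with the two endpoint patches
def pvExtendLast : List (List String) → List (List String)
  | [] => []
  | [m] => [m ++ ["norm", "output"]]
  | m :: rest => m :: pvExtendLast rest

def pvMid : List (List Int) → List (List String)
  | [] => []
  | r :: rest => pvExtendLast (("tok_embeddings" :: pvLayers r) :: rest.map pvLayers)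

theorem pvAGo_cons (n idx : Nat) (r : List Int) (rest : List (List Int)) :
    pvAGo n idx (r :: rest)
      = ((if idx = 0 then ["tok_embeddings"] else [])
          ++ pvLayers r
          ++ (if idx = n - 1 then ["norm", "output"] else [])) :: pvAGo n (idx + 1) rest := rfl

theorem pvAGo_tail (l : List (List Int)) : ∀ (idx : Nat),
    pvAGo (idx + 1 + l.length) (idx + 1) l = pvExtendLast (l.map pvLayers) := by
  induction l with
  | nil => intro idx; simp [pvAGo, pvExtendLast]
  | cons r rest ih =>
      intro idx
      have h1 : idx + 1 ≠ 0 := by omega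
      cases rest with
      | nil =>
          rw [pvAGo_cons, if_neg h1, if_pos (by simp)]
          · simp [pvAGo, pvExtendLast]
      | cons r2 rest2 =>
          have hne : idx + 1 ≠ idx + 1 + (r :: r2 :: rest2 : List (List Int)).length - 1 := by
            simp only [List.length_cons]; omega
          have hrec : idx + 1 + (r :: r2 :: rest2 : List (List Int)).length
              = (idx + 1) + 1 + (r2 :: rest2 : List (List Int)).length := by simp only [List.length_cons]; omega
          rw [pvAGo_cons, if_neg h1, if_neg hne, hrec, ih (idx + 1)]
          simp [pvExtendLast]

theorem a_eq_mid (stage_ranges : List (List Int)) :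
    default_stage_modules_py stage_ranges = pvMid stage_ranges := by
  cases stage_ranges with
  | nil => rfl
  | cons r rest =>
      show pvAGo (r :: rest : List (List Int)).length 0 (r :: rest) = _
      cases rest with
      | nil => simp [pvAGo, pvMid, pvExtendLast]
      | cons r2 rest2 =>
          have hne : (0 : Nat) ≠ (r :: r2 :: rest2 : List (List Int)).length - 1 := by
            simp only [List.length_cons]; omega
          have hrec : (r :: r2 :: rest2 : List (List Int)).length
              = 0 + 1 + (r2 :: rest2 : List (List Int)).length := by simp; omega
          rw [pvAGo_cons, if_pos rfl, if_neg hne, hrec, pvAGo_tail (r2 :: rest2) 0]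
          simp [pvMid, pvExtendLast]

-- splitting a flat list at segment lengths recovers the segments
theorem pvSplit_flatten (segs : List (List String)) : ∀ (pre : List String),
    pvSplit (pre ++ segs.flatten) (pre.length : Int) (segs.map (fun s => (s.length : Int))) = segs := by
  induction segs with
  | nil => intro pre; simp [pvSplit]
  | cons s rest ih =>
      intro pre
      simp only [List.map_cons, List.flatten_cons, pvSplit]
      refine List.cons_eq_cons.mpr ⟨?_, ?_⟩
      · have : pre ++ (s ++ rest.flatten) = pre ++ s ++ rest.flatten := by simp
        have hb : ((pre.length : Int) + (s.length : Int)) = (((pre.length + s.length : Nat)) : Int) := by push_cast; ring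
        rw [this, hb, PySem.List.slice_natCast]
        simp
      · have h1 : pre ++ (s ++ rest.flatten) = (pre ++ s) ++ rest.flatten := by simp
        have h2 : ((pre.length : Int) + (s.length : Int)) = ((pre ++ s).length : Int) := by
          simp
        rw [h1, h2, ih (pre ++ s)]

theorem flatten_extendLast (L : List (List String)) (h : L ≠ []) :
    (pvExtendLast L).flatten = L.flatten ++ ["norm", "output"] := by
  induction L with
  | nil => exact absurd rfl h
  | cons m rest ih =>
      cases rest with
      | nil => simp [pvExtendLast]
      | cons m2 rest2 => simp [pvExtendLast, ih (by simp)]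

theorem map_length_extendLast (L : List (List String)) :
    (pvExtendLast L).map (fun s => (s.length : Int)) = pvPatchLast2 (L.map (fun s => (s.length : Int))) := by
  induction L with
  | nil => rfl
  | cons m rest ih =>
      cases rest with
      | nil => simp [pvExtendLast, pvPatchLast2]
      | cons m2 rest2 =>
          simp only [pvExtendLast, List.map_cons, pvPatchLast2] at *
          rw [ih]

theorem layers_length (r : List Int) :
    ((pvLayers r).length : Int)
      = ((PySem.List.pyRange (PySem.List.pyGetD r 0 0) (PySem.List.pyGetD r 1 0 + 1) 1).length : Int) := by
  simp [pvLayers]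

theorem b_eq_mid (stage_ranges : List (List Int)) :
    default_stage_modules_py_alt stage_ranges = pvMid stage_ranges := by
  cases stage_ranges with
  | nil => rfl
  | cons r rest =>
      unfold default_stage_modules_py_alt
      rw [if_neg (by simp)]
      simp only [List.map_cons]
      set segs := pvExtendLast (("tok_embeddings" :: pvLayers r) :: rest.map pvLayers) with hsegs
      have hLne : (("tok_embeddings" :: pvLayers r) :: rest.map pvLayers : List (List String)) ≠ [] := by simp
      have hflat : ("tok_embeddings" :: (r :: rest).flatMap pvLayers ++ ["norm", "output"] : List String)
          = segs.flatten := by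
        rw [hsegs, flatten_extendLast _ hLne]
        simp [List.flatMap_def]
      have hcounts :
          pvPatchLast2 ((((PySem.List.pyRange (PySem.List.pyGetD r 0 0) (PySem.List.pyGetD r 1 0 + 1) 1).length : Int) + 1)
              :: rest.map (fun r =>
                ((PySem.List.pyRange (PySem.List.pyGetD r 0 0) (PySem.List.pyGetD r 1 0 + 1) 1).length : Int)))
            = segs.map (fun s => (s.length : Int)) := by
        rw [hsegs, map_length_extendLast]
        congr 1
        simp only [List.map_cons, List.map_map, List.length_cons]
        refine List.cons_eq_cons.mpr ⟨?_, ?_⟩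
        · rw [← layers_length]; push_cast; ring
        · apply List.map_congr_left; intro x _; simp [layers_length]
      rw [hflat, hcounts]
      have h0 : (0 : Int) = (([] : List String).length : Int) := by simp
      rw [h0]
      have := pvSplit_flatten segs ([] : List String)
      simpa [pvMid, hsegs] using this

-- ===== VERDICT (by name: the statement is the Claim_ definition above) =====
theorem default_stage_modules_py_spec : Claim_equal_default_stage_modules_py := by
  intro sr _ _
  unfold Spec_default_stage_modules_py
  rw [a_eq_mid, b_eq_mid]
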